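/- GENERATED by mk_final_copies.py from the proof of the farm's unit `vorbis_decode_packet_rest.14` (farm:vorbis_decode_packet_rest.14.2: Lemmas.lean) as the
   re-elaboration sweep compiled it — do not edit. -/
import Asan.CheckWalk
import Vorbis.Spec.PacketRestFrame
import Vorbis.Spec.Units.vorbis_decode_packet_rest_14

/-!
  LEMMAS OF THE UNIT `vorbis_decode_packet_rest.14` (segment .14: `current_loc` bookkeeping and `*len`).

  The short-final-frame path reads the stack argument `right_end` in place at `[entry rsp + 8]` AFTER it has stored to `*len`,
  so every walk here takes the fact `hoff : entry rsp + 24 ≤ len` (`len` lies off the two incoming stack-argument slots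
  `[entry rsp + 8, entry rsp + 24)`). Under contracts version 1 that fact was missing (this unit came back CONTRACT-PRE); since
  version 2 it is the clause `Args.len_above` of the precondition, and Proof.lean feeds it to `statement_of_off`. The lemmas:

      SegCore             the part of `At14Core` the segment needs (no rip): `Frame`, four slots, `mem32[p_left]`, the window facts
      SegCore.of_at       `At14Core` gives `SegCore`
      keep3               a read off the three windows the segment writes
      SegCore.stores      `SegCore` is kept by any batch of stores into the scratch slots below the steady rsp, `f->current_loc` /
                          `f->current_loc_valid`, and `*len` — GIVEN `hoff : entry rsp + 24 ≤ len` (`Args.len_above`)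
      SegCore.exit        the exit assertion `At15` from `SegCore` and `left' ≤ *len ≤ right_end` (W3 from W2, `DecodeSame`)
      SegCore.left_le_re, SegCore.re_le, read_stored32, add_left, trunc_val      window arithmetic; the uint32 analysis of the short final frame
      walk_tail           0x1119ed → 0x111a3e   (lines 3465–3473), given `hoff`
      walk_add            0x111bf8 → 0x111a3e   (lines 3452–3455), given `hoff` — THE PLACE WHERE `hoff` IS NEEDED: the load of
                          `right_end` at 0x111c0d is read through the store to `*len`
      walk_resync         0x111b94 → 0x1119ed   (lines 3462–3463), then `walk_tail`
      seg14_of_off        0x1119bc → 0x111a3e: the whole segment (14 check sites, all paths), given `hoff`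
      statement_of_off    the unit's `Statement` from "`entry rsp + 24 ≤ len` at every entry state"
      overlap_read        why `hoff` is needed: a store of 128 at `a + 3` makes the dword at `a` negative as an `int`
-/

open X86 X86.User Asan Vorbis Vorbis.Spec Vorbis.Spec.vorbis_decode_packet_rest

set_option maxRecDepth 4000
set_option maxHeartbeats 4000000

namespace Vorbis.Spec.vorbis_decode_packet_rest_14

variable {u₀ : State} {others : List Obj} {frames : List (Nat × FrameLayout)} {len : Nat} {Ar : Arena}
  {stored room : Int} {mode : Nat} {ysz : Nat → Nat} {u : State} {ret : Word} {left' : Int}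

/-- **What segment .14 needs of its entry assertion `At14Core`, without the rip**: the machine frame and the invariant
(`Frame`), the four slots the segment loads (`[0x40] = f`, `[0x68] = len`, `[0x78] = left'`, `right_end` in place at
`[entry rsp + 8]`), `mem32[p_left] = left'`, `r13 = SB`, and the window facts of `left'`. It holds at every inner cut point of
the segment (0x1119ed, 0x111b94, 0x111bf8): the slots are spelled as the walker spells them (`entry rsp − k`). -/
structure SegCore (u₀ : State) (others : List Obj) (frames : List (Nat × FrameLayout)) (len : Nat) (Ar : Arena)
    (stored room : Int) (mode : Nat) (ysz : Nat → Nat) (u : State) (ret : Word) (left' : Int) (v : State) : Prop where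
  frame : Frame u₀ others frames len Ar stored room mode ysz u ret v
  slot_f : v.mem.readLE (u.reg .rsp - 2936) 8 = fOf u
  slot_len : v.mem.readLE (u.reg .rsp - 2896) 8 = lenOf u
  slot_ls : sint32 (v.mem.readLE (u.reg .rsp - 2880) 4) = left'
  arg_re : sint32 (v.mem.readLE (u.reg .rsp + 8) 4) = reOf u
  left_val : v.mem.i32 (pLeftOf u) = left'
  r13 : (v.reg .r13).toNat = sbOf u
  left_nonneg : 0 ≤ left'
  left_half : left' ≤ stb_vorbis.blocksize_1 v.mem (fOf u) / 2
  left_ge : lsOf u ≤ left'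
  left_le : left' ≤ rsOf u
  first : stb_vorbis.first_decode v.mem (fOf u) = 0
  drained : stb_vorbis.bytes_in_seg v.mem (fOf u) = 0

/-- The entry assertion of the segment gives `SegCore`. -/
theorem SegCore.of_at {v : State} (hat : At14Core u₀ others frames len Ar stored room mode ysz u ret left' v) :
    SegCore u₀ others frames len Ar stored room mode ysz u ret left' v := by
  have e1 : u.reg .rsp - 3000 + 0x40 = u.reg .rsp - 2936 := by u_omega
  have e2 : u.reg .rsp - 3000 + 0x68 = u.reg .rsp - 2896 := by u_omega
  have e3 : u.reg .rsp - 3000 + 0x78 = u.reg .rsp - 2880 := by u_omega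
  refine ⟨hat.toStable.toFrame, ?_, ?_, ?_, hat.arg_re, hat.left_val, hat.r13, hat.left_nonneg, hat.left_half, hat.left_ge,
    hat.left_le, hat.first, hat.drained⟩
  · rw [← e1]
    exact hat.slot_f
  · rw [← e2]
    exact hat.slot_len
  · rw [← e3]
    exact hat.slot_ls

/-- **A read off the three windows the segment writes** (the scratch slots `[sp − 3008, sp − 2996)` — the return addresses of
the check calls and the dword at the steady `[rsp]` —, `f->current_loc` / `f->current_loc_valid`, `*len`). -/
theorem keep3 {sp f pl : Nat} {m m' : Mem}
    (hs : Mem.SameExcept [⟨sp - 3008, sp - 2996⟩, ⟨f + 1392, f + 1400⟩, ⟨pl, pl + 4⟩] m m') (a : Word) (k : Nat)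
    (h0 : a.toNat + k < 2 ^ 64) (h1 : a.toNat + k ≤ sp - 3008 ∨ sp - 2996 ≤ a.toNat)
    (h2 : a.toNat + k ≤ f + 1392 ∨ f + 1400 ≤ a.toNat) (h3 : a.toNat + k ≤ pl ∨ pl + 4 ≤ a.toNat) :
    m'.readLE a k = m.readLE a k := by
  apply hs.readLE a k h0
  intro w hw
  simp only [List.mem_cons, List.mem_nil_iff, or_false] at hw
  rcases hw with rfl | rfl | rfl
  · exact h1
  · exact h2
  · exact h3

/-- **`SegCore` is kept by the stores of the segment**: any batch of stores into the scratch slots below the steady rsp (the return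
addresses of the check calls, the dword at the steady `[rsp]`), into `f->current_loc` / `f->current_loc_valid` (one decode-time
hole of `*f`) and into `*len`; the registers rsp and r13, the ABI flags and the text as before. `hoff` is THE MISSING FACT of the
contract: `len` lies above the two stack-argument slots `[entry rsp + 8, entry rsp + 24)`. -/
theorem SegCore.stores {v s : State} (hc : SegCore u₀ others frames len Ar stored room mode ysz u ret left' v)
    (hoff : (u.reg .rsp).toNat + 24 ≤ lenOf u)
    (hrsp : s.reg .rsp = v.reg .rsp) (hr13 : s.reg .r13 = v.reg .r13) (habi : abiInv s) (hcode : Vorbis.CodeOK u₀ s.mem)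
    (hs : Mem.SameExcept [⟨(u.reg .rsp).toNat - 3008, (u.reg .rsp).toNat - 2996⟩, ⟨fOf u + 1392, fOf u + 1400⟩,
      ⟨lenOf u, lenOf u + 4⟩] v.mem s.mem) :
    SegCore u₀ others frames len Ar stored room mode ysz u ret left' s := by
  have hfr := hc.frame
  have he := hfr.entry
  have he_align : (u.reg .rsp).toNat % 8 = 0 := he.align
  have he_room : 0x700000 + 3856 ≤ (u.reg .rsp).toNat := he.room
  have he_top : (u.reg .rsp).toNat + 8 ≤ 0x800000 := he.top
  obtain ⟨hsh, hinv0, hargs⟩ := hfr.pre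
  have hinv := hfr.inv
  have hbits := hinv.fb.vorbis.bits
  have hobr := hbits.OBR
  have hoffs := hinv.objOff
  simp only [voff] at hobr hoffs
  obtain ⟨hobr1, hobr2⟩ := hobr
  have hlen3 : lenOf u + 4 ≤ 0x800000 := hargs.len_obj.2.2
  -- where `p_left` is: a stack object of a caller, at or above the clean stack's end; apart from `len`
  have hpl1 := hargs.left_obj.1.above hsh.inv
  have hpl2 := hargs.left_obj.2
  have hapart := hargs.apart
  -- the numbers of the slot addresses
  have a0 : (u.reg .rsp).toNat < 2 ^ 64 := (u.reg .rsp).toNat_lt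
  have n1 : (u.reg .rsp - 2936).toNat = (u.reg .rsp).toNat - 2936 := by u_omega
  have n2 : (u.reg .rsp - 2896).toNat = (u.reg .rsp).toNat - 2896 := by u_omega
  have n3 : (u.reg .rsp - 2880).toNat = (u.reg .rsp).toNat - 2880 := by u_omega
  have n4 : (u.reg .rsp + 8).toNat = (u.reg .rsp).toNat + 8 := by u_omega
  have n5 : (u.reg .rsp - 8).toNat = (u.reg .rsp).toNat - 8 := by u_omega
  have n6 : (u.reg .rsp - 16).toNat = (u.reg .rsp).toNat - 16 := by u_omega
  have n7 : (u.reg .rsp - 24).toNat = (u.reg .rsp).toNat - 24 := by u_omega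
  have n8 : (u.reg .rsp - 32).toNat = (u.reg .rsp).toNat - 32 := by u_omega
  have n9 : (u.reg .rsp - 40).toNat = (u.reg .rsp).toNat - 40 := by u_omega
  have n10 : (u.reg .rsp - 48).toNat = (u.reg .rsp).toNat - 48 := by u_omega
  -- the shadow is untouched
  have hun : ShadowUntouched v.mem s.mem := by
    apply hs.eqOn
    intro w hw
    simp only [List.mem_cons, List.mem_nil_iff, or_false] at hw
    rcases hw with rfl | rfl | rfl <;> simp only [] <;> omega
  -- fields of `*f` off the hole `[1392, 1400)`
  have hfield : ∀ (off k : Nat), off + k ≤ 1392 ∨ 1400 ≤ off → off + k ≤ 1808 →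
      s.mem.readLE (addr (fOf u + off)) k = v.mem.readLE (addr (fOf u + off)) k := by
    intro off k h1 h2
    have e : (addr (fOf u + off)).toNat = fOf u + off := toNat_addr _ (by omega)
    apply keep3 hs
    · rw [e]
      omega
    · rw [e]
      omega
    · rw [e]
      omega
    · rw [e]
      omega
  -- the decode-time invariant over the batch of stores
  have hinv' : DecodeInv others (framesIn frames u) len Ar stored room ysz s.mem (fOf u) := by
    have hoffst := hinv.offStack
    apply hinv.frame_stores hs
    · intro sp hsp
      simp only [List.mem_cons, List.mem_nil_iff, or_false] at hsp
      rcases hsp with rfl | rfl | rfl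
      · apply StoreOK.off
        intro B hB
        have := hoffst B hB
        simp only []
        omega
      · apply StoreOK.hole
        unfold InHole
        simp only []
        omega
      · apply StoreOK.off
        intro B hB
        have := hoffst B hB
        simp only []
        omega
    · exact hinv.fb.env.eqOn hun
    · apply ADO.frame_stores hinv.fb.ado hs
      · simp only [voff]
        omega
      · intro sp hsp
        simp only [List.mem_cons, List.mem_nil_iff, or_false] at hsp
        rcases hsp with rfl | rfl | rfl <;> simp only [] <;> omega
      · intro sp hsp
        simp only [List.mem_cons, List.mem_nil_iff, or_false] at hsp
        rcases hsp with rfl | rfl | rfl <;> simp only [] <;> omega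
    · intro _
      apply hbits.frame_fields
      apply Bits.SameFields.of_sameExcept hs
      all_goals
        intro w hw
        simp only [List.mem_cons, List.mem_nil_iff, or_false] at hw
        rcases hw with rfl | rfl | rfl <;> simp only [] <;> omega
    · intro _
      apply hinv.fb.vorbis.buffers.M7.transfer
      apply ObjEq.of_sameExcept hs
      · intro w hw
        simp only [Mdct.M7Range.wins, List.mem_cons, List.mem_nil_iff, or_false] at hw
        rcases hw with rfl | rfl <;> simp only [] <;> omega
      · intro w hw sp hsp
        simp only [Mdct.M7Range.wins, List.mem_cons, List.mem_nil_iff, or_false] at hw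
        simp only [List.mem_cons, List.mem_nil_iff, or_false] at hsp
        rcases hw with rfl | rfl <;> rcases hsp with rfl | rfl | rfl <;> simp only [] <;> omega
    · intro _
      apply hinv.fb.vorbis.w1.transfer
      apply ObjEq.of_sameExcept hs
      · intro w hw
        simp only [W1.wins, List.mem_cons, List.mem_nil_iff, or_false] at hw
        rcases hw with rfl | rfl <;> simp only [] <;> omega
      · intro w hw sp hsp
        simp only [W1.wins, List.mem_cons, List.mem_nil_iff, or_false] at hw
        simp only [List.mem_cons, List.mem_nil_iff, or_false] at hsp
        rcases hw with rfl | rfl <;> rcases hsp with rfl | rfl | rfl <;> simp only [] <;> omega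
  -- the footprint so far
  have hsame' : Mem.SameExcept ((vorbis_decode_packet_rest.spec others frames len Ar stored room mode ysz).footprint u)
      u.mem s.mem := by
    apply hfr.same.step_same hs
    intro w hw a h1 h2
    apply covered_footprint
    simp only [List.mem_cons, List.mem_nil_iff, or_false] at hw
    rcases hw with rfl | rfl | rfl
    · left
      simp only [] at h1 h2
      omega
    · right
      left
      refine ⟨⟨fOf u + 1392, fOf u + 1400⟩, ?_, h1, h2⟩
      simp only [holes, List.mem_cons, List.mem_nil_iff, or_false, true_or, or_true]
    · right
      right
      right
      right
      right
      left
      exact ⟨h1, h2⟩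
  refine ⟨⟨he, hfr.pre, ?_, hcode, habi, hsame', ?_, ?_, ?_, ?_, ?_, ?_, ?_, ?_, hinv'⟩, ?_, ?_, ?_, ?_, ?_, ?_, hc.left_nonneg, ?_,
    hc.left_ge, hc.left_le, ?_, ?_⟩
  · rw [hrsp]
    exact hfr.rsp
  · rw [keep3 hs _ _ (by omega) (by omega) (by omega) (by omega)]
    exact hfr.ra
  · rw [keep3 hs _ _ (by omega) (by omega) (by omega) (by omega)]
    exact hfr.s_r15
  · rw [keep3 hs _ _ (by omega) (by omega) (by omega) (by omega)]
    exact hfr.s_r14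
  · rw [keep3 hs _ _ (by omega) (by omega) (by omega) (by omega)]
    exact hfr.s_r13
  · rw [keep3 hs _ _ (by omega) (by omega) (by omega) (by omega)]
    exact hfr.s_r12
  · rw [keep3 hs _ _ (by omega) (by omega) (by omega) (by omega)]
    exact hfr.s_rbp
  · rw [keep3 hs _ _ (by omega) (by omega) (by omega) (by omega)]
    exact hfr.s_rbx
  · exact hfr.shadow.untouched hun
  · rw [keep3 hs _ _ (by omega) (by omega) (by omega) (by omega)]
    exact hc.slot_f
  · rw [keep3 hs _ _ (by omega) (by omega) (by omega) (by omega)]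
    exact hc.slot_len
  · rw [keep3 hs _ _ (by omega) (by omega) (by omega) (by omega)]
    exact hc.slot_ls
  · rw [keep3 hs _ _ (by omega) (by omega) (by omega) (by omega)]
    exact hc.arg_re
  · -- `mem32[p_left]`
    have e : (addr (pLeftOf u)).toNat = pLeftOf u := toNat_addr _ (by omega)
    show sint32 (s.mem.readLE (addr (pLeftOf u)) 4) = left'
    rw [keep3 hs _ _ (by omega) (by omega) (by omega) (by omega)]
    exact hc.left_val
  · rw [hr13]
    exact hc.r13
  · have e : stb_vorbis.blocksize_1 s.mem (fOf u) = stb_vorbis.blocksize_1 v.mem (fOf u) := by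
      show sint32 (s.mem.readLE (addr (fOf u + 156)) 4) = sint32 (v.mem.readLE (addr (fOf u + 156)) 4)
      rw [hfield 156 4 (by omega) (by omega)]
    rw [e]
    exact hc.left_half
  · show s.mem.readLE (addr (fOf u + 1749)) 1 = 0
    rw [hfield 1749 1 (by omega) (by omega)]
    exact hc.first
  · show s.mem.readLE (addr (fOf u + 1748)) 1 = 0
    rw [hfield 1748 1 (by omega) (by omega)]
    exact hc.drained

/-- **The exit assertion `At15` from `SegCore`** at 0x111a3e with `eax = 1`, once `*len` holds a value in `[left', right_end]`:
W3 is W2 of the precondition (`W2.bounds`; the block sizes and the mode's `blockflag` read as at the entry: `DecodeSame` over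
the function's footprint so far), the window facts of `left'`, and the two bounds of `*len`. -/
theorem SegCore.exit {s : State} (hc : SegCore u₀ others frames len Ar stored room mode ysz u ret left' s)
    (hrip : s.rip = Vorbis.L.vorbis_decode_packet_rest.cut42) (hrax : s.reg .rax = 1)
    (hlen1 : left' ≤ s.mem.i32 (lenOf u)) (hlen2 : s.mem.i32 (lenOf u) ≤ reOf u) :
    At15 u₀ others frames len Ar stored room mode ysz u ret s := by
  have hfr := hc.frame
  have he := hfr.entry
  have he_room : 0x700000 + 3856 ≤ (u.reg .rsp).toNat := he.room
  obtain ⟨hsh, hinv0, hargs⟩ := hfr.pre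
  have hv0 := hinv0.fb.vorbis
  -- `*f` outside its decode-time holes reads as at the entry
  have hd : DecodeSame (fOf u) u.mem s.mem :=
    StoreOK.decodeSame hinv0.ok hinv0.ob1 hinv0.sep hfr.same (fun sp hsp => footprint_storeOK hfr.pre he_room sp hsp)
  have eb0 : stb_vorbis.blocksize_0 s.mem (fOf u) = stb_vorbis.blocksize_0 u.mem (fOf u) := hd.i32 152 (by decide)
  have eb1 : stb_vorbis.blocksize_1 s.mem (fOf u) = stb_vorbis.blocksize_1 u.mem (fOf u) := hd.i32 156 (by decide)
  have hmd := hv0.mode.MD1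
  have hmode := hargs.mode_lt
  have hm := hargs.m_eq
  simp only [vacc, voff] at hm
  have ebf : Mode.blockflag s.mem (mOf u) = Mode.blockflag u.mem (mOf u) := by
    show s.mem.u8 (mOf u + 0) = u.mem.u8 (mOf u + 0)
    rw [hm]
    have e := hd.u8 (484 + 6 * mode) (InWins.of_mem (144, 1000) (by decide) (by simp only []; omega) (by simp only []; omega))
    have e' : fOf u + 484 + 6 * mode + 0 = fOf u + (484 + 6 * mode) := by omega
    rw [e']
    exact e
  have en : nIntOf s.mem (fOf u) (mOf u) = nIntOf u.mem (fOf u) (mOf u) := by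
    unfold nIntOf
    rw [ebf, eb0, eb1]
  -- the window arithmetic
  obtain ⟨le, hw2⟩ := hargs.w2
  have hb := (HeaderOK.HD3 hv0.header).hd3v
  have hbd := hw2.bounds hb
  have hlh := hc.left_half
  have hlv := hc.left_val
  refine ⟨hfr, hrip, hc.r13, hrax, ?_, ?_, hc.first, hc.drained⟩
  · rw [en, eb1, hlv]
    rw [eb1] at hlh
    have h1 := hc.left_nonneg
    have h2 := hc.left_le
    constructor <;> omega
  · rw [hlv]
    exact hc.left_ge

/-- `left' ≤ right_start ≤ right_end` (W2 of the precondition): the bound of `*len = right_end` from below. -/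
theorem SegCore.left_le_re {s : State} (hc : SegCore u₀ others frames len Ar stored room mode ysz u ret left' s) :
    left' ≤ reOf u := by
  obtain ⟨hsh, hinv0, hargs⟩ := hc.frame.pre
  obtain ⟨le, hw2⟩ := hargs.w2
  have hbd := hw2.bounds (HeaderOK.HD3 hinv0.fb.vorbis.header).hd3v
  have h2 := hc.left_le
  omega

/-- A dword stored by a 32-bit `mov` reads back as it is. -/
theorem read_stored32 (M : Mem) (a : Word) (x : BitVec 32) : (M.writeLE a 4 x.toNat).readLE a 4 = x.toNat := by
  rw [Mem.readLE_writeLE_same _ _ _ _ (by decide)]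
  have h := x.isLt
  have e : (256 : Nat) ^ 4 = 2 ^ 32 := by decide
  rw [e]
  exact Nat.mod_eq_of_lt h

/-- 0x1119ed, line 3465 `if (f->current_loc_valid)`: the join of the normal path and of the resynchronisation (0x111bdc). -/
abbrev tailAt : Word := 0x1119ed

/-- **0x1119ed … 0x111a3e** (lines 3465–3473): `if (f->current_loc_valid) f->current_loc += right_start − left_start; *len =
right_end; return TRUE`. Two paths into the exit; on both `*len = right_end`, and `SegCore` is kept by the stores (`SegCore.stores`). -/
theorem walk_tail (Lay : Layout) (hLay : Lay.hi = 0x1000000) (μ : Microarch) (hμ : UserX.MicroOK μ) (u₀ : State)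
    (hcode : HasCodeNat Lay u₀ Vorbis.L.vorbis_decode_packet_rest.entry Vorbis.Code.code_vorbis_decode_packet_rest.nat Vorbis.L.vorbis_decode_packet_rest.size)
    (hload4 : Asan.SmallCheck Lay μ Vorbis.WayInv (Vorbis.CodeOK u₀) [.rax, .rcx, .rdx] 4 Vorbis.L.__asan_load4_noabort.entry)
    (hstore4 : Asan.SmallCheck Lay μ Vorbis.WayInv (Vorbis.CodeOK u₀) [.rax, .rcx, .rdx] 4 Vorbis.L.__asan_store4_noabort.entry)
    (others : List Obj) (frames : List (Nat × FrameLayout)) (len : Nat) (Ar : Arena)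
    (stored room : Int) (mode : Nat) (ysz : Nat → Nat) (u : State) (ret : Word) (left' : Int) (v : State)
    (hc : SegCore u₀ others frames len Ar stored room mode ysz u ret left' v)
    (hoff : (u.reg .rsp).toNat + 24 ≤ lenOf u)
    (w_rip : v.rip = tailAt) :
    ReachVia Lay μ Vorbis.WayInv v (fun w => At15 u₀ others frames len Ar stored room mode ysz u ret w) := by
  have he := hc.frame.entry
  v_entry he
  have hv_rsp : v.reg .rsp = u.reg .rsp - 3000 := hc.frame.rsp
  have w_eq : Mem.EqOn Vorbis.L.textLo Vorbis.L.textHi u₀.mem v.mem := hc.frame.code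
  have hdf : v.flags .df = false := (show abiInv _ from hc.frame.abi).1
  have hmx : v.mxcsr &&& 0x1F80 = 0x1F80 := (show abiInv _ from hc.frame.abi).2
  have hsse := Vorbis.sseOK_of_abiInv hc.frame.abi
  obtain ⟨f, hf⟩ : ∃ f : Nat, (u.reg .rdi).toNat = f := ⟨_, rfl⟩
  obtain ⟨pl, hpl⟩ : ∃ pl : Nat, (u.reg .rsi).toNat = pl := ⟨_, rfl⟩
  have hinv : DecodeInv others (framesIn frames u) len Ar stored room ysz v.mem f := hf ▸ hc.frame.inv
  have hbits := hinv.fb.vorbis.bits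
  have hL := hinv.live
  have hobr := hbits.OBR
  have hoffs := hinv.objOff
  simp only [voff] at hobr hoffs
  obtain ⟨hobr1, hobr2⟩ := hobr
  have hlen3 : pl + 4 ≤ 0x800000 := hpl ▸ hc.frame.pre.2.2.len_obj.2.2
  have hoff' : (u.reg .rsp).toNat + 24 ≤ pl := hpl ▸ hoff
  have hlive : LiveIn others (framesIn frames u) pl 4 :=
    hpl ▸ (hc.frame.pre.2.2.len_obj.1.mono (framesIn_sub others frames u))
  have sf : v.mem.readLE (u.reg .rsp - 2936) 8 = f := hf ▸ hc.slot_f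
  have slen : v.mem.readLE (u.reg .rsp - 2896) 8 = pl := hpl ▸ hc.slot_len
  obtain ⟨re32, hre32⟩ : ∃ x : Nat, v.mem.readLE (u.reg .rsp + 8) 4 = x := ⟨_, rfl⟩
  have hre := hc.arg_re
  rw [hre32] at hre
  u_walk hcode [hμ.vendor] until [Vorbis.L.vorbis_decode_packet_rest.cut42] span [Vorbis.L.textLo, Vorbis.L.textHi] side (v_side)
  · -- 0x1119f9, load4 [f + 0x574] (`f->current_loc_valid`)
    have hun : ShadowUntouched v.mem s_1119f9.mem := by v_untouched
    have hs := hbits.site_field hL 1396 4 (by omega) (by omega) rfl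
    exact Vorbis.Spec.check_site hc.frame.shadow hun hs (by u_omega)
  · -- 0x111a2b, store4 [len]
    have hun : ShadowUntouched v.mem s_111a2b.mem := by v_untouched
    exact hlive.accSmall hc.frame.shadow hun _ 4 (by decide) (by u_omega) (by u_omega)
  · -- 0x111a0e, load4 [f + 0x570] (`f->current_loc`)
    have hun : ShadowUntouched v.mem s_111a0e.mem := by v_untouched
    have hs := hbits.site_field hL 1392 4 (by omega) (by omega) rfl
    exact Vorbis.Spec.check_site hc.frame.shadow hun hs (by u_omega)
  · -- 0x111a2b, store4 [len]
    have hun : ShadowUntouched v.mem s_111a2b.mem := by v_untouched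
    exact hlive.accSmall hc.frame.shadow hun _ 4 (by decide) (by u_omega) (by u_omega)
  · refine ReachVia.done ?_
    have hs : Mem.SameExcept [⟨(u.reg .rsp).toNat - 3008, (u.reg .rsp).toNat - 2996⟩, ⟨f + 1392, f + 1400⟩,
        ⟨pl, pl + 4⟩] v.mem s_111a39.mem := by
      rw [w_mem]
      u_same
    rw [← hf, ← hpl] at hs
    have hrsp : s_111a39.reg .rsp = v.reg .rsp := by rw [w_rsp, hv_rsp]
    have hr13 : s_111a39.reg .r13 = v.reg .r13 := w_kept .r13 rfl
    have habi : abiInv s_111a39 := by v_inv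
    have hc' := hc.stores hoff hrsp hr13 habi w_eq hs
    have hlt : re32 < 2 ^ 32 := hre32 ▸ Mem.readLE_lt' v.mem _ 4
    have e1 : s_111a39.mem.readLE (UInt64.ofNat pl) 4 = re32 := by
      rw [w_mem, read_stored32, BitVec.toNat_ofNat]
      exact Nat.mod_eq_of_lt hlt
    have hlen : s_111a39.mem.i32 (lenOf u) = reOf u := by
      show sint32 (s_111a39.mem.readLE (UInt64.ofNat (u.reg .rsi).toNat) 4) = reOf u
      rw [hpl, e1]
      exact hre
    have hrax : s_111a39.reg .rax = 1 := by
      rw [w_rax]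
      rfl
    exact hc'.exit w_rip hrax (by rw [hlen]; exact hc'.left_le_re) (by rw [hlen]; exact Int.le_refl _)
  · refine ReachVia.done ?_
    have hs : Mem.SameExcept [⟨(u.reg .rsp).toNat - 3008, (u.reg .rsp).toNat - 2996⟩, ⟨f + 1392, f + 1400⟩,
        ⟨pl, pl + 4⟩] v.mem s_111a39.mem := by
      rw [w_mem]
      u_same
    rw [← hf, ← hpl] at hs
    have hrsp : s_111a39.reg .rsp = v.reg .rsp := by rw [w_rsp, hv_rsp]
    have hr13 : s_111a39.reg .r13 = v.reg .r13 := w_kept .r13 rfl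
    have habi : abiInv s_111a39 := by v_inv
    have hc' := hc.stores hoff hrsp hr13 habi w_eq hs
    have hlt : re32 < 2 ^ 32 := hre32 ▸ Mem.readLE_lt' v.mem _ 4
    have e1 : s_111a39.mem.readLE (UInt64.ofNat pl) 4 = re32 := by
      rw [w_mem, read_stored32, BitVec.toNat_ofNat]
      exact Nat.mod_eq_of_lt hlt
    have hlen : s_111a39.mem.i32 (lenOf u) = reOf u := by
      show sint32 (s_111a39.mem.readLE (UInt64.ofNat (u.reg .rsi).toNat) 4) = reOf u
      rw [hpl, e1]
      exact hre
    have hrax : s_111a39.reg .rax = 1 := by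
      rw [w_rax]
      rfl
    exact hc'.exit w_rip hrax (by rw [hlen]; exact hc'.left_le_re) (by rw [hlen]; exact Int.le_refl _)

/-- `right_end ≤ n ≤ b1 ≤ 8192` (W2 of the precondition, HD3). -/
theorem SegCore.re_le {u₀ : State} {others : List Obj} {frames : List (Nat × FrameLayout)} {len : Nat} {Ar : Arena}
  {stored room : Int} {mode : Nat} {ysz : Nat → Nat} {u : State} {ret : Word} {left' : Int} {s : State} (hc : SegCore u₀ others frames len Ar stored room mode ysz u ret left' s) :
    reOf u ≤ 8192 := by
  obtain ⟨hsh, hinv0, hargs⟩ := hc.frame.pre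
  obtain ⟨le, hw2⟩ := hargs.w2
  have hb := (HeaderOK.HD3 hinv0.fb.vorbis.header).hd3v
  have hbd := hw2.bounds hb
  have h3 := hb.hi
  omega

/-- **`*len += left_start` in 32 bits**: with `0 ≤ left'`, `0 ≤ x ≤ right_end − left'`, `right_end ≤ 8192` nothing wraps. -/
theorem add_left (ls32 x32 : Nat) (left' x re : Int) (hls : sint32 ls32 = left') (hx : sint32 x32 = x)
    (hls32 : ls32 < 2 ^ 32) (hx32 : x32 < 2 ^ 32)
    (h0 : 0 ≤ left') (h1 : 0 ≤ x) (h2 : x ≤ re - left') (h3 : re ≤ 8192) :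
    sint32 (BitVec.ofNat 32 ls32 + BitVec.ofNat 32 x32).toNat = left' + x := by
  simp only [BitVec.toNat_add, BitVec.toNat_ofNat, Nat.reducePow]
  have c1 := sint32_cases ls32
  have c2 := sint32_cases x32
  have c3 := sint32_cases ((ls32 % 4294967296 + x32 % 4294967296) % 4294967296)
  omega

/-- **The uint32 analysis of the short final frame** (lines 3445–3450, `Vorbis.trunc_len` at machine level): the test
`current_end < current_loc + (right_end − left')` held in 32-bit arithmetic and `current_loc ≤ current_end`, so the dword
`current_end − current_loc` stored to `*len` is in `[0, right_end − left']` as an `int`. -/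
theorem trunc_val (re32 ls32 cl ce : Nat) (re left' : Int) (hre : sint32 re32 = re) (hls : sint32 ls32 = left')
    (h0 : 0 ≤ left') (h1 : left' ≤ re) (h2 : re ≤ 8192) (hre32 : re32 < 2 ^ 32) (hls32 : ls32 < 2 ^ 32)
    (htest : ce % 4294967296 < (BitVec.ofNat 32 re32 - BitVec.ofNat 32 ls32 + BitVec.ofNat 32 cl).toNat)
    (hge : cl % 4294967296 ≤ ce % 4294967296) :
    0 ≤ sint32 (BitVec.ofNat 32 ce - BitVec.ofNat 32 cl).toNat ∧
      sint32 (BitVec.ofNat 32 ce - BitVec.ofNat 32 cl).toNat ≤ re - left' := by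
  simp only [BitVec.toNat_add, BitVec.toNat_sub, BitVec.toNat_ofNat, Nat.reducePow] at htest ⊢
  have c1 := sint32_cases re32
  have c2 := sint32_cases ls32
  have c3 := sint32_cases ((4294967296 - cl % 4294967296 + ce % 4294967296) % 4294967296)
  omega

/-- 0x111bf8, line 3452 `*len += left_start`: the join of the two arms of the short final frame. -/
abbrev addLeftAt : Word := 0x111bf8

/-- **0x111bf8 … 0x111c36 → 0x111a3e** (lines 3452–3455): `*len += left_start; if (*len > right_end) *len = right_end;
f->current_loc += *len; return TRUE`, entered with `0 ≤ *len ≤ right_end − left'` (`trunc_val`). Two paths (the clamp is dead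
in fact, but both give `left' ≤ *len ≤ right_end`). The load of `right_end` at 0x111c0d is read THROUGH the store to `*len`:
this is where `hoff` is needed. -/
theorem walk_add (Lay : Layout) (hLay : Lay.hi = 0x1000000) (μ : Microarch) (hμ : UserX.MicroOK μ) (u₀ : State)
    (hcode : HasCodeNat Lay u₀ Vorbis.L.vorbis_decode_packet_rest.entry Vorbis.Code.code_vorbis_decode_packet_rest.nat Vorbis.L.vorbis_decode_packet_rest.size)
    (hload4 : Asan.SmallCheck Lay μ Vorbis.WayInv (Vorbis.CodeOK u₀) [.rax, .rcx, .rdx] 4 Vorbis.L.__asan_load4_noabort.entry)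
    (others : List Obj) (frames : List (Nat × FrameLayout)) (len : Nat) (Ar : Arena)
    (stored room : Int) (mode : Nat) (ysz : Nat → Nat) (u : State) (ret : Word) (left' : Int) (v : State)
    (hc : SegCore u₀ others frames len Ar stored room mode ysz u ret left' v)
    (hoff : (u.reg .rsp).toNat + 24 ≤ lenOf u)
    (w_rip : v.rip = addLeftAt)
    (hxlo : 0 ≤ v.mem.i32 (lenOf u)) (hxhi : v.mem.i32 (lenOf u) ≤ reOf u - left') :
    ReachVia Lay μ Vorbis.WayInv v (fun w => At15 u₀ others frames len Ar stored room mode ysz u ret w) := by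
  have he := hc.frame.entry
  v_entry he
  have hv_rsp : v.reg .rsp = u.reg .rsp - 3000 := hc.frame.rsp
  have w_eq : Mem.EqOn Vorbis.L.textLo Vorbis.L.textHi u₀.mem v.mem := hc.frame.code
  have hdf : v.flags .df = false := (show abiInv _ from hc.frame.abi).1
  have hmx : v.mxcsr &&& 0x1F80 = 0x1F80 := (show abiInv _ from hc.frame.abi).2
  have hsse := Vorbis.sseOK_of_abiInv hc.frame.abi
  obtain ⟨f, hf⟩ : ∃ f : Nat, (u.reg .rdi).toNat = f := ⟨_, rfl⟩
  obtain ⟨pl, hpl⟩ : ∃ pl : Nat, (u.reg .rsi).toNat = pl := ⟨_, rfl⟩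
  have hinv : DecodeInv others (framesIn frames u) len Ar stored room ysz v.mem f := hf ▸ hc.frame.inv
  have hbits := hinv.fb.vorbis.bits
  have hL := hinv.live
  have hobr := hbits.OBR
  have hoffs := hinv.objOff
  simp only [voff] at hobr hoffs
  obtain ⟨hobr1, hobr2⟩ := hobr
  have hlen3 : pl + 4 ≤ 0x800000 := hpl ▸ hc.frame.pre.2.2.len_obj.2.2
  have hoff' : (u.reg .rsp).toNat + 24 ≤ pl := hpl ▸ hoff
  have hlive : LiveIn others (framesIn frames u) pl 4 :=
    hpl ▸ (hc.frame.pre.2.2.len_obj.1.mono (framesIn_sub others frames u))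
  have sf : v.mem.readLE (u.reg .rsp - 2936) 8 = f := hf ▸ hc.slot_f
  have slen : v.mem.readLE (u.reg .rsp - 2896) 8 = pl := hpl ▸ hc.slot_len
  obtain ⟨re32, hre32⟩ : ∃ x : Nat, v.mem.readLE (u.reg .rsp + 8) 4 = x := ⟨_, rfl⟩
  have hre := hc.arg_re
  rw [hre32] at hre
  have hre_lt : re32 < 2 ^ 32 := hre32 ▸ Mem.readLE_lt' v.mem _ 4
  obtain ⟨ls32, hls32⟩ : ∃ x : Nat, v.mem.readLE (u.reg .rsp - 2880) 4 = x := ⟨_, rfl⟩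
  have hls := hc.slot_ls
  rw [hls32] at hls
  have hls_lt : ls32 < 2 ^ 32 := hls32 ▸ Mem.readLE_lt' v.mem _ 4
  obtain ⟨x32, hx32⟩ : ∃ x : Nat, v.mem.readLE (UInt64.ofNat pl) 4 = x := ⟨_, rfl⟩
  have hx32_lt : x32 < 2 ^ 32 := hx32 ▸ Mem.readLE_lt' v.mem _ 4
  have hxv : sint32 x32 = v.mem.i32 (lenOf u) := by
    show sint32 x32 = sint32 (v.mem.readLE (UInt64.ofNat (u.reg .rsi).toNat) 4)
    rw [hpl, hx32]
  have hHas : Lay.Has (UInt64.ofNat f + 1392) 4 := by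
    have e : (UInt64.ofNat f + 1392).toNat = f + 1392 := by u_omega
    refine ⟨?_, ?_⟩
    · show 0x100000 ≤ _
      rw [e]
      omega
    · rw [hLay, e]
      omega
  u_walk hcode [hμ.vendor] until [Vorbis.L.vorbis_decode_packet_rest.cut42] span [Vorbis.L.textLo, Vorbis.L.textHi] side (v_side)
  · -- 0x111c00, load4 [len]
    have hun : ShadowUntouched v.mem s_111c00.mem := by v_untouched
    exact hlive.accSmall hc.frame.shadow hun _ 4 (by decide) (by u_omega) (by u_omega)
  · -- the path without the clamp: `*len = left' + x`
    refine ReachVia.done ?_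
    have hs : Mem.SameExcept [⟨(u.reg .rsp).toNat - 3008, (u.reg .rsp).toNat - 2996⟩, ⟨f + 1392, f + 1400⟩,
        ⟨pl, pl + 4⟩] v.mem s_111c36.mem := by
      rw [w_mem]
      u_same
    rw [← hf, ← hpl] at hs
    have hrsp : s_111c36.reg .rsp = v.reg .rsp := by rw [w_rsp, hv_rsp]
    have hr13 : s_111c36.reg .r13 = v.reg .r13 := w_kept .r13 rfl
    have habi : abiInv s_111c36 := by v_inv
    have hc' := hc.stores hoff hrsp hr13 habi w_eq hs
    have e1 : s_111c36.mem.readLE (UInt64.ofNat pl) 4 = (BitVec.ofNat 32 ls32 + BitVec.ofNat 32 x32).toNat := by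
      rw [w_mem]
      u_read
    have hlen : s_111c36.mem.i32 (lenOf u) = left' + v.mem.i32 (lenOf u) := by
      show sint32 (s_111c36.mem.readLE (UInt64.ofNat (u.reg .rsi).toNat) 4) = _
      rw [hpl, e1]
      exact add_left ls32 x32 left' _ (reOf u) hls hxv hls_lt hx32_lt hc.left_nonneg hxlo hxhi hc.re_le
    have hrax : s_111c36.reg .rax = 1 := by
      rw [w_rax]
      rfl
    exact hc'.exit w_rip hrax (by rw [hlen]; omega) (by rw [hlen]; omega)
  · -- the clamp (line 3453, dead in fact): `*len = right_end`
    refine ReachVia.done ?_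
    have hs : Mem.SameExcept [⟨(u.reg .rsp).toNat - 3008, (u.reg .rsp).toNat - 2996⟩, ⟨f + 1392, f + 1400⟩,
        ⟨pl, pl + 4⟩] v.mem s_111c36.mem := by
      rw [w_mem]
      u_same
    rw [← hf, ← hpl] at hs
    have hrsp : s_111c36.reg .rsp = v.reg .rsp := by rw [w_rsp, hv_rsp]
    have hr13 : s_111c36.reg .r13 = v.reg .r13 := w_kept .r13 rfl
    have habi : abiInv s_111c36 := by v_inv
    have hc' := hc.stores hoff hrsp hr13 habi w_eq hs
    have e1 : s_111c36.mem.readLE (UInt64.ofNat pl) 4 = (BitVec.ofNat 32 re32).toNat := by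
      rw [w_mem]
      u_read
    have hlen : s_111c36.mem.i32 (lenOf u) = reOf u := by
      show sint32 (s_111c36.mem.readLE (UInt64.ofNat (u.reg .rsi).toNat) 4) = _
      rw [hpl, e1, BitVec.toNat_ofNat, Nat.mod_eq_of_lt hre_lt]
      exact hre
    have hrax : s_111c36.reg .rax = 1 := by
      rw [w_rax]
      rfl
    exact hc'.exit w_rip hrax (by rw [hlen]; exact hc'.left_le_re) (by rw [hlen]; exact Int.le_refl _)

/-- 0x111b94, line 3462 `f->current_loc = f->known_loc_for_packet - (n2-left_start)`: the join of the three ways out of the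
test of line 3442 / 3445. -/
abbrev resyncAt : Word := 0x111b94

/-- **0x111b94 … 0x111bdc → 0x1119ed** (lines 3462–3463): `f->current_loc = f->known_loc_for_packet − (n2 − left_start);
f->current_loc_valid = TRUE`, then the tail (`walk_tail`). One path; the stores go to the steady `[rsp]` and into the hole
`[f + 1392, f + 1400)` of `*f`: `SegCore.stores`. -/
theorem walk_resync (Lay : Layout) (hLay : Lay.hi = 0x1000000) (μ : Microarch) (hμ : UserX.MicroOK μ) (u₀ : State)
    (hcode : HasCodeNat Lay u₀ Vorbis.L.vorbis_decode_packet_rest.entry Vorbis.Code.code_vorbis_decode_packet_rest.nat Vorbis.L.vorbis_decode_packet_rest.size)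
    (hload4 : Asan.SmallCheck Lay μ Vorbis.WayInv (Vorbis.CodeOK u₀) [.rax, .rcx, .rdx] 4 Vorbis.L.__asan_load4_noabort.entry)
    (hstore4 : Asan.SmallCheck Lay μ Vorbis.WayInv (Vorbis.CodeOK u₀) [.rax, .rcx, .rdx] 4 Vorbis.L.__asan_store4_noabort.entry)
    (others : List Obj) (frames : List (Nat × FrameLayout)) (len : Nat) (Ar : Arena)
    (stored room : Int) (mode : Nat) (ysz : Nat → Nat) (u : State) (ret : Word) (left' : Int) (v : State)
    (hc : SegCore u₀ others frames len Ar stored room mode ysz u ret left' v)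
    (hoff : (u.reg .rsp).toNat + 24 ≤ lenOf u)
    (w_rip : v.rip = resyncAt) :
    ReachVia Lay μ Vorbis.WayInv v (fun w => At15 u₀ others frames len Ar stored room mode ysz u ret w) := by
  have he := hc.frame.entry
  v_entry he
  have hv_rsp : v.reg .rsp = u.reg .rsp - 3000 := hc.frame.rsp
  have w_eq : Mem.EqOn Vorbis.L.textLo Vorbis.L.textHi u₀.mem v.mem := hc.frame.code
  have hdf : v.flags .df = false := (show abiInv _ from hc.frame.abi).1
  have hmx : v.mxcsr &&& 0x1F80 = 0x1F80 := (show abiInv _ from hc.frame.abi).2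
  have hsse := Vorbis.sseOK_of_abiInv hc.frame.abi
  obtain ⟨f, hf⟩ : ∃ f : Nat, (u.reg .rdi).toNat = f := ⟨_, rfl⟩
  obtain ⟨pl, hpl⟩ : ∃ pl : Nat, (u.reg .rsi).toNat = pl := ⟨_, rfl⟩
  have hinv : DecodeInv others (framesIn frames u) len Ar stored room ysz v.mem f := hf ▸ hc.frame.inv
  have hbits := hinv.fb.vorbis.bits
  have hL := hinv.live
  have hobr := hbits.OBR
  have hoffs := hinv.objOff
  simp only [voff] at hobr hoffs
  obtain ⟨hobr1, hobr2⟩ := hobr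
  have hlen3 : pl + 4 ≤ 0x800000 := hpl ▸ hc.frame.pre.2.2.len_obj.2.2
  have hoff' : (u.reg .rsp).toNat + 24 ≤ pl := hpl ▸ hoff
  have sf : v.mem.readLE (u.reg .rsp - 2936) 8 = f := hf ▸ hc.slot_f
  have hHas : Lay.Has (UInt64.ofNat f + 1396) 4 := by
    have e : (UInt64.ofNat f + 1396).toNat = f + 1396 := by u_omega
    refine ⟨?_, ?_⟩
    · show 0x100000 ≤ _
      rw [e]
      omega
    · rw [hLay, e]
      omega
  u_walk hcode [hμ.vendor] until [tailAt] span [Vorbis.L.textLo, Vorbis.L.textHi] side (v_side)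
  · -- 0x111ba0, load4 [f + 0x6f4] (`f->known_loc_for_packet`)
    have hun : ShadowUntouched v.mem s_111ba0.mem := by v_untouched
    have hs := hbits.site_field hL 1780 4 (by omega) (by omega) rfl
    exact Vorbis.Spec.check_site hc.frame.shadow hun hs (by u_omega)
  · -- 0x111bc5, store4 [f + 0x570] (`f->current_loc`)
    have hun : ShadowUntouched v.mem s_111bc5.mem := by v_untouched
    have hs := hbits.site_field hL 1392 4 (by omega) (by omega) rfl
    exact Vorbis.Spec.check_site hc.frame.shadow hun hs (by u_omega)
  · -- 0x1119ed: `SegCore` again, then the tail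
    have hs : Mem.SameExcept [⟨(u.reg .rsp).toNat - 3008, (u.reg .rsp).toNat - 2996⟩, ⟨f + 1392, f + 1400⟩,
        ⟨pl, pl + 4⟩] v.mem s_111bdc.mem := by
      rw [w_mem]
      u_same
    rw [← hf, ← hpl] at hs
    have hrsp : s_111bdc.reg .rsp = v.reg .rsp := by rw [w_rsp, hv_rsp]
    have hr13 : s_111bdc.reg .r13 = v.reg .r13 := w_kept .r13 rfl
    have habi : abiInv s_111bdc := by v_inv
    have hc' := hc.stores hoff hrsp hr13 habi w_eq hs
    exact walk_tail Lay hLay μ hμ u₀ hcode hload4 hstore4 others frames len Ar stored room mode ysz u ret left' s_111bdc hc'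
      hoff w_rip

/-- **Segment .14 from its entry, GIVEN THE MISSING FACT `hoff`** (`entry rsp + 24 ≤ len`: `len` lies above the two stack-argument
slots). 0x1119bc: the test of line 3440; then the tail (`walk_tail`), the resynchronisation (`walk_resync`, three ways in) or the
short final frame (lines 3445–3450, two arms into `walk_add`). -/
theorem seg14_of_off (Lay : Layout) (hLay : Lay.hi = 0x1000000) (μ : Microarch) (hμ : UserX.MicroOK μ) (u₀ : State)
    (hcode : HasCodeNat Lay u₀ Vorbis.L.vorbis_decode_packet_rest.entry Vorbis.Code.code_vorbis_decode_packet_rest.nat Vorbis.L.vorbis_decode_packet_rest.size)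
    (hload4 : Asan.SmallCheck Lay μ Vorbis.WayInv (Vorbis.CodeOK u₀) [.rax, .rcx, .rdx] 4 Vorbis.L.__asan_load4_noabort.entry)
    (hstore4 : Asan.SmallCheck Lay μ Vorbis.WayInv (Vorbis.CodeOK u₀) [.rax, .rcx, .rdx] 4 Vorbis.L.__asan_store4_noabort.entry)
    (hload1 : Asan.SmallCheck Lay μ Vorbis.WayInv (Vorbis.CodeOK u₀) [.rax, .rdx] 1 Vorbis.L.__asan_load1_noabort.entry)
    (others : List Obj) (frames : List (Nat × FrameLayout)) (len : Nat) (Ar : Arena)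
    (stored room : Int) (mode : Nat) (ysz : Nat → Nat) (u : State) (ret : Word) (left' : Int) (v : State)
    (hat : At14Core u₀ others frames len Ar stored room mode ysz u ret left' v)
    (hoff : (u.reg .rsp).toNat + 24 ≤ lenOf u) :
    ReachVia Lay μ Vorbis.WayInv v (fun w => At15 u₀ others frames len Ar stored room mode ysz u ret w) := by
  have hc := SegCore.of_at hat
  have w_rip := hat.rip
  have he := hc.frame.entry
  v_entry he
  have hv_rsp : v.reg .rsp = u.reg .rsp - 3000 := hc.frame.rsp
  have w_eq : Mem.EqOn Vorbis.L.textLo Vorbis.L.textHi u₀.mem v.mem := hc.frame.code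
  have hdf : v.flags .df = false := (show abiInv _ from hc.frame.abi).1
  have hmx : v.mxcsr &&& 0x1F80 = 0x1F80 := (show abiInv _ from hc.frame.abi).2
  have hsse := Vorbis.sseOK_of_abiInv hc.frame.abi
  obtain ⟨f, hf⟩ : ∃ f : Nat, (u.reg .rdi).toNat = f := ⟨_, rfl⟩
  obtain ⟨pl, hpl⟩ : ∃ pl : Nat, (u.reg .rsi).toNat = pl := ⟨_, rfl⟩
  have hinv : DecodeInv others (framesIn frames u) len Ar stored room ysz v.mem f := hf ▸ hc.frame.inv
  have hbits := hinv.fb.vorbis.bits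
  have hL := hinv.live
  have hobr := hbits.OBR
  have hoffs := hinv.objOff
  simp only [voff] at hobr hoffs
  obtain ⟨hobr1, hobr2⟩ := hobr
  have hlen3 : pl + 4 ≤ 0x800000 := hpl ▸ hc.frame.pre.2.2.len_obj.2.2
  have hoff' : (u.reg .rsp).toNat + 24 ≤ pl := hpl ▸ hoff
  have hlive : LiveIn others (framesIn frames u) pl 4 :=
    hpl ▸ (hc.frame.pre.2.2.len_obj.1.mono (framesIn_sub others frames u))
  have sf : v.mem.readLE (u.reg .rsp - 2936) 8 = f := hf ▸ hc.slot_f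
  have slen : v.mem.readLE (u.reg .rsp - 2896) 8 = pl := hpl ▸ hc.slot_len
  obtain ⟨re32, hre32⟩ : ∃ x : Nat, v.mem.readLE (u.reg .rsp + 8) 4 = x := ⟨_, rfl⟩
  have hre := hc.arg_re
  rw [hre32] at hre
  have hre_lt : re32 < 2 ^ 32 := hre32 ▸ Mem.readLE_lt' v.mem _ 4
  obtain ⟨ls32, hls32⟩ : ∃ x : Nat, v.mem.readLE (u.reg .rsp - 2880) 4 = x := ⟨_, rfl⟩
  have hls := hc.slot_ls
  rw [hls32] at hls
  have hls_lt : ls32 < 2 ^ 32 := hls32 ▸ Mem.readLE_lt' v.mem _ 4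
  obtain ⟨cl, hcl⟩ : ∃ x : Nat, v.mem.readLE (UInt64.ofNat f + 1392) 4 = x := ⟨_, rfl⟩
  obtain ⟨ce, hce⟩ : ∃ x : Nat, v.mem.readLE (UInt64.ofNat f + 1780) 4 = x := ⟨_, rfl⟩
  u_walk hcode [hμ.vendor] until [tailAt, resyncAt, addLeftAt] span [Vorbis.L.textLo, Vorbis.L.textHi] side (v_side)
  · -- 0x1119c8, load4 [f + 0x6e0] (`f->last_seg_which`)
    have hun : ShadowUntouched v.mem s_1119c8.mem := by v_untouched
    have hs := hbits.site_field hL 1760 4 (by omega) (by omega) rfl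
    exact Vorbis.Spec.check_site hc.frame.shadow hun hs (by u_omega)
  · -- 0x1119db, load4 [f + 0x6f0] (`f->end_seg_with_known_loc`)
    have hun : ShadowUntouched v.mem s_1119db.mem := by v_untouched
    have hs := hbits.site_field hL 1776 4 (by omega) (by omega) rfl
    exact Vorbis.Spec.check_site hc.frame.shadow hun hs (by u_omega)
  · -- 0x111b36, load4 [f + 0x574] (`f->current_loc_valid`)
    have hun : ShadowUntouched v.mem s_111b36.mem := by v_untouched
    have hs := hbits.site_field hL 1396 4 (by omega) (by omega) rfl
    exact Vorbis.Spec.check_site hc.frame.shadow hun hs (by u_omega)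
  · -- 0x111b4c, load1 [f + 0x6d3] (`f->page_flag`)
    have hun : ShadowUntouched v.mem s_111b4c.mem := by v_untouched
    have hs := hbits.site_field hL 1747 1 (by omega) (by omega) rfl
    exact Vorbis.Spec.check_site hc.frame.shadow hun hs (by u_omega)
  · -- 0x111b62, load4 [f + 0x6f4] (`f->known_loc_for_packet`)
    have hun : ShadowUntouched v.mem s_111b62.mem := by v_untouched
    have hs := hbits.site_field hL 1780 4 (by omega) (by omega) rfl
    exact Vorbis.Spec.check_site hc.frame.shadow hun hs (by u_omega)
  · -- 0x111b75, load4 [f + 0x570] (`f->current_loc`)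
    have hun : ShadowUntouched v.mem s_111b75.mem := by v_untouched
    have hs := hbits.site_field hL 1392 4 (by omega) (by omega) rfl
    exact Vorbis.Spec.check_site hc.frame.shadow hun hs (by u_omega)
  · -- 0x111c45, store4 [len] (`*len = current_end - f->current_loc`)
    have hun : ShadowUntouched v.mem s_111c45.mem := by v_untouched
    exact hlive.accSmall hc.frame.shadow hun _ 4 (by decide) (by u_omega) (by u_omega)
  · -- 0x111bed, store4 [len] (`*len = 0`)
    have hun : ShadowUntouched v.mem s_111bed.mem := by v_untouched
    exact hlive.accSmall hc.frame.shadow hun _ 4 (by decide) (by u_omega) (by u_omega)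
  · -- `current_loc_valid = 0`: to the resynchronisation, 0x111b94
    have hs : Mem.SameExcept [⟨(u.reg .rsp).toNat - 3008, (u.reg .rsp).toNat - 2996⟩, ⟨f + 1392, f + 1400⟩,
        ⟨pl, pl + 4⟩] v.mem s_111b43.mem := by
      rw [w_mem]
      u_same
    rw [← hf, ← hpl] at hs
    have hrsp : s_111b43.reg .rsp = v.reg .rsp := by rw [w_rsp, hv_rsp]
    have hr13 : s_111b43.reg .r13 = v.reg .r13 := w_kept .r13 rfl
    have habi : abiInv s_111b43 := by v_inv
    have hc' := hc.stores hoff hrsp hr13 habi w_eq hs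
    exact walk_resync Lay hLay μ hμ u₀ hcode hload4 hstore4 others frames len Ar stored room mode ysz u ret left' s_111b43 hc'
      hoff w_rip
  · -- not the last page: to the resynchronisation, 0x111b94
    have hs : Mem.SameExcept [⟨(u.reg .rsp).toNat - 3008, (u.reg .rsp).toNat - 2996⟩, ⟨f + 1392, f + 1400⟩,
        ⟨pl, pl + 4⟩] v.mem s_111b59.mem := by
      rw [w_mem]
      u_same
    rw [← hf, ← hpl] at hs
    have hrsp : s_111b59.reg .rsp = v.reg .rsp := by rw [w_rsp, hv_rsp]
    have hr13 : s_111b59.reg .r13 = v.reg .r13 := w_kept .r13 rfl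
    have habi : abiInv s_111b59 := by v_inv
    have hc' := hc.stores hoff hrsp hr13 habi w_eq hs
    exact walk_resync Lay hLay μ hμ u₀ hcode hload4 hstore4 others frames len Ar stored room mode ysz u ret left' s_111b59 hc'
      hoff w_rip
  · -- the short final frame, `current_loc ≤ current_end`: `*len = current_end − current_loc`, in `[0, right_end − left']`
    have hs : Mem.SameExcept [⟨(u.reg .rsp).toNat - 3008, (u.reg .rsp).toNat - 2996⟩, ⟨f + 1392, f + 1400⟩,
        ⟨pl, pl + 4⟩] v.mem s_111c4d.mem := by
      rw [w_mem]
      u_same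
    rw [← hf, ← hpl] at hs
    have hrsp : s_111c4d.reg .rsp = v.reg .rsp := by rw [w_rsp, hv_rsp]
    have hr13 : s_111c4d.reg .r13 = v.reg .r13 := w_kept .r13 rfl
    have habi : abiInv s_111c4d := by v_inv
    have hc' := hc.stores hoff hrsp hr13 habi w_eq hs
    have e1 : s_111c4d.mem.readLE (UInt64.ofNat pl) 4 = (BitVec.ofNat 32 ce - BitVec.ofNat 32 cl).toNat := by
      rw [w_mem, read_stored32]
    have hlen : s_111c4d.mem.i32 (lenOf u) = sint32 (BitVec.ofNat 32 ce - BitVec.ofNat 32 cl).toNat := by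
      show sint32 (s_111c4d.mem.readLE (UInt64.ofNat (u.reg .rsi).toNat) 4) = _
      rw [hpl, e1]
    have hval := trunc_val re32 ls32 cl ce (reOf u) left' hre hls hc.left_nonneg hc.left_le_re hc.re_le hre_lt hls_lt
      hbr_111b92 hbr_111be3
    rw [← hlen] at hval
    exact walk_add Lay hLay μ hμ u₀ hcode hload4 others frames len Ar stored room mode ysz u ret left' s_111c4d hc'
      hoff w_rip hval.1 hval.2
  · -- the short final frame, `current_end < current_loc`: `*len = 0`
    have hs : Mem.SameExcept [⟨(u.reg .rsp).toNat - 3008, (u.reg .rsp).toNat - 2996⟩, ⟨f + 1392, f + 1400⟩,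
        ⟨pl, pl + 4⟩] v.mem s_111bf2.mem := by
      rw [w_mem]
      u_same
    rw [← hf, ← hpl] at hs
    have hrsp : s_111bf2.reg .rsp = v.reg .rsp := by rw [w_rsp, hv_rsp]
    have hr13 : s_111bf2.reg .r13 = v.reg .r13 := w_kept .r13 rfl
    have habi : abiInv s_111bf2 := by v_inv
    have hc' := hc.stores hoff hrsp hr13 habi w_eq hs
    have e1 : s_111bf2.mem.readLE (UInt64.ofNat pl) 4 = 0 := by
      rw [w_mem, Mem.readLE_writeLE_same _ _ _ _ (by decide)]
    have hlen : s_111bf2.mem.i32 (lenOf u) = 0 := by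
      show sint32 (s_111bf2.mem.readLE (UInt64.ofNat (u.reg .rsi).toNat) 4) = _
      rw [hpl, e1]
      rfl
    have hle := hc.left_le_re
    exact walk_add Lay hLay μ hμ u₀ hcode hload4 others frames len Ar stored room mode ysz u ret left' s_111bf2 hc'
      hoff w_rip (by rw [hlen]; exact Int.le_refl _) (by rw [hlen]; omega)
  · -- the last page, but `current_end ≥ current_loc + (right_end − left_start)`: to the resynchronisation, 0x111b94
    have hs : Mem.SameExcept [⟨(u.reg .rsp).toNat - 3008, (u.reg .rsp).toNat - 2996⟩, ⟨f + 1392, f + 1400⟩,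
        ⟨pl, pl + 4⟩] v.mem s_111b92.mem := by
      rw [w_mem]
      u_same
    rw [← hf, ← hpl] at hs
    have hrsp : s_111b92.reg .rsp = v.reg .rsp := by rw [w_rsp, hv_rsp]
    have hr13 : s_111b92.reg .r13 = v.reg .r13 := w_kept .r13 rfl
    have habi : abiInv s_111b92 := by v_inv
    have hc' := hc.stores hoff hrsp hr13 habi w_eq hs
    exact walk_resync Lay hLay μ hμ u₀ hcode hload4 hstore4 others frames len Ar stored room mode ysz u ret left' s_111b92 hc'
      hoff w_rip
  · -- `last_seg_which ≠ end_seg_with_known_loc`: the tail, 0x1119ed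
    have hs : Mem.SameExcept [⟨(u.reg .rsp).toNat - 3008, (u.reg .rsp).toNat - 2996⟩, ⟨f + 1392, f + 1400⟩,
        ⟨pl, pl + 4⟩] v.mem s_1119e7.mem := by
      rw [w_mem]
      u_same
    rw [← hf, ← hpl] at hs
    have hrsp : s_1119e7.reg .rsp = v.reg .rsp := by rw [w_rsp, hv_rsp]
    have hr13 : s_1119e7.reg .r13 = v.reg .r13 := w_kept .r13 rfl
    have habi : abiInv s_1119e7 := by v_inv
    have hc' := hc.stores hoff hrsp hr13 habi w_eq hs
    exact walk_tail Lay hLay μ hμ u₀ hcode hload4 hstore4 others frames len Ar stored room mode ysz u ret left' s_1119e7 hc'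
      hoff w_rip

/-- **The unit's statement follows from `len` lying above the argument slots**: if every state that satisfies the entry assertion has `len` above
the two stack-argument slots (`entry rsp + 24 ≤ len` — the clause `Args.len_above` of contracts version 2, through `Frame.pre`), the
statement of `vorbis_decode_packet_rest.14` holds. This is the whole proof of the unit, waiting for that one hypothesis. -/
theorem statement_of_off
    (hmissing : ∀ (u₀ : State) (others : List Obj) (frames : List (Nat × FrameLayout)) (len : Nat) (Ar : Arena)
      (stored room : Int) (mode : Nat) (ysz : Nat → Nat) (u : State) (ret : Word) (left' : Int) (v : State),
      At14Core u₀ others frames len Ar stored room mode ysz u ret left' v → (u.reg .rsp).toNat + 24 ≤ lenOf u) :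
    Vorbis.Spec.vorbis_decode_packet_rest_14.Statement := by
  intro Lay hLay μ hμ u₀ hcode hload4 hstore4 hload1
  intro others frames len Ar stored room mode ysz u ret v hat
  obtain ⟨left', hat⟩ := hat
  have hoff := hmissing u₀ others frames len Ar stored room mode ysz u ret left' v hat
  exact seg14_of_off Lay hLay μ hμ u₀ hcode hload4 hstore4 hload1 others frames len Ar stored room mode ysz u ret left' v hat hoff

/-- **WHY `hoff` IS NEEDED, as a fact about the memory model** (the evidence of the earlier CONTRACT-PRE report): a dword store of 128 three bytes
above `a` (`*len = 128` with `len = entry rsp + 11`, an address `LiveIn.above` does not exclude) makes the dword at `a` (the stack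
argument `right_end` at `entry rsp + 8`, read in place at 0x111c0d) at least `2^31`: negative as an `int`, so the signed test
of line 3453 takes the clamp and `*len` becomes negative. -/
theorem overlap_read (m : Mem) (a : Word) (h : a.toNat + 8 ≤ 2 ^ 64) :
    2 ^ 31 ≤ (m.writeLE (a + 3) 4 128).readLE a 4 := by
  have e3 : (a + 3).toNat = a.toNat + 3 := by u_omega
  have e4 : (a + 3 + 1).toNat = a.toNat + 4 := by u_omega
  have ea : a + 1 + 1 + 1 = a + 3 := by u_omega
  have hb : ((m.writeLE (a + 3) 4 128).read (a + 3)).toNat = 128 := by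
    show (((m.write (a + 3) (UInt8.ofNat (128 % 256))).writeLE (a + 3 + 1) 3 (128 / 256)).read (a + 3)).toNat = 128
    rw [Mem.read_writeLE_disjoint_noWrap _ _ _ _ _ (by unfold Mem.NoWrap; omega) (by omega), Mem.read_write_same]
    rfl
  simp only [Mem.readLE]
  rw [ea, hb]
  omega

end Vorbis.Spec.vorbis_decode_packet_rest_14
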